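-- pv_equiv track=rewrite | github.com/EvokiTimpal/timpal | timpal.py | _chain_weight
-- ===== SOURCE A (Python) =====
-- def _chain_weight(blocks: list) -> int:
--     """Chain weight: +1 per block, -(gap-1) per missing slot. Penalises sparse chains."""
--     weight    = 0
--     prev_slot = None
--     for b in blocks:
--         slot = b.get("slot", 0)
--         if prev_slot is not None:
--             gap = slot - prev_slot
--             if gap > 1:
--                 weight -= (gap - 1)
--         weight   += 1
--         prev_slot = slot
--     return max(weight, 0)
-- ===== SOURCE B (Python) =====
-- def _chain_weight(blocks: list) -> int:
--     """Chain weight: +1 per block, -(gap-1) per missing slot. Penalises sparse chains."""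
--     slots = [b.get("slot", 0) for b in blocks]
--     # Segment the slot sequence into maximal runs in which consecutive slots
--     # differ by at most 1 (no missing slot inside a run); keep (first, last).
--     runs = []
--     i, n = 0, len(slots)
--     while i < n:
--         j = i
--         while j + 1 < n and slots[j + 1] - slots[j] <= 1:
--             j += 1
--         runs.append((slots[i], slots[j]))
--         i = j + 1
--     # Every penalty comes from a boundary between two runs, where the gap is
--     # > 1 by construction, so no per-pair clamp or gap test is needed here.
--     penalty = sum(nf - cl - 1 for (_, cl), (nf, _) in zip(runs, runs[1:]))
--     return max(n - penalty, 0)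
-- ===== Notes on version B (the rewrite author's own statement) =====
-- stated objective: alternative
-- what changed: B segments the slot sequence into maximal runs with consecutive gap <= 1 (a run list (first,last) replaces A's running weight/prev-slot accumulator); the penalty is then the plain sum of boundary gaps between adjacent runs, with no per-pair gap>1 test or clamp, and the result is max(len(blocks) - penalty, 0).
import Mathlib
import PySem

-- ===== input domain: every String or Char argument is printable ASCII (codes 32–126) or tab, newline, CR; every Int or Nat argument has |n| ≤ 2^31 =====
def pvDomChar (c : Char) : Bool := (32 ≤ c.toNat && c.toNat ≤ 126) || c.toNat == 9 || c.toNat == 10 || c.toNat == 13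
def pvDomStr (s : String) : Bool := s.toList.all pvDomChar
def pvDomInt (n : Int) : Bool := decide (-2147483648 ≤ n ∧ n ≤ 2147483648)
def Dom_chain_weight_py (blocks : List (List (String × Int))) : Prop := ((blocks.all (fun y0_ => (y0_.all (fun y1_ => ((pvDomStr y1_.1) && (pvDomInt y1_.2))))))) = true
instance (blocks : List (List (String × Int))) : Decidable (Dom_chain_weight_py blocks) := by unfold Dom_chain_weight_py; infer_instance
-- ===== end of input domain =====

-- B replaces A's fused running-weight/prev-slot scan by a run-segmentation: maximal runs of slots
-- with consecutive gap <= 1, then the penalty is the plain sum of boundary gaps between adjacent runs.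

-- ===== PORT A =====
def pvStepA (st : Int × Option Int) (b : List (String × Int)) : Int × Option Int :=
  let slot := PySem.Dict.getD (PySem.Dict.mk b) "slot" 0
  let w :=
    match st.2 with
    | none => st.1
    | some p => if slot - p > 1 then st.1 - (slot - p - 1) else st.1
  (w + 1, some slot)

def chain_weight_py (blocks : List (List (String × Int))) : Int :=
  max (blocks.foldl pvStepA (0, none)).1 0

-- ===== PORT B =====
def pvSlots (blocks : List (List (String × Int))) : List Int :=
  blocks.map (fun b => PySem.Dict.getD (PySem.Dict.mk b) "slot" 0)

-- Source B's nested while loops as the obvious recursion over the same state: the current run's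
-- first slot (slots[i]) and last slot so far (slots[j]), plus the remaining slots; the inner
-- while extends the run while the gap is <= 1, otherwise the run (first, last) is emitted
def pvRunsAux (f l : Int) : List Int → List (Int × Int)
  | [] => [(f, l)]
  | x :: t => if x - l ≤ 1 then pvRunsAux f x t else (f, l) :: pvRunsAux x x t

def pvRuns : List Int → List (Int × Int)
  | [] => []
  | s :: t => pvRunsAux s s t

-- penalty = sum over zip(runs, runs[1:]) of (next.first - cur.last - 1)
def pvPen : List (Int × Int) → Int
  | (_, l) :: (f2, l2) :: t => (f2 - l - 1) + pvPen ((f2, l2) :: t)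
  | _ => 0

def chain_weight_py_alt (blocks : List (List (String × Int))) : Int :=
  max ((blocks.length : Int) - pvPen (pvRuns (pvSlots blocks))) 0

-- ===== PRECONDITION & SPEC =====
def Spec_chain_weight_py (blocks : List (List (String × Int))) (out : Int) : Prop := out = chain_weight_py_alt blocks
instance (blocks : List (List (String × Int))) (out : Int) : Decidable (Spec_chain_weight_py blocks out) := by unfold Spec_chain_weight_py; infer_instance

-- ===== CLAIM (what is proved, stated in full; the proofs are below) =====
def Claim_equal_chain_weight_py : Prop := ∀ (blocks : List (List (String × Int))), Dom_chain_weight_py blocks → Spec_chain_weight_py blocks (chain_weight_py blocks)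

-- ===== LEMMAS AND PROOFS =====

-- A's loop step, expressed on the slot value (used to relate A's fold over blocks to slots)
def pvStepS (st : Int × Option Int) (s : Int) : Int × Option Int :=
  let w :=
    match st.2 with
    | none => st.1
    | some p => if s - p > 1 then st.1 - (s - p - 1) else st.1
  (w + 1, some s)

theorem pvFoldA_eq_foldS (blocks : List (List (String × Int))) (st : Int × Option Int) :
    blocks.foldl pvStepA st = (pvSlots blocks).foldl pvStepS st := by
  simp [pvSlots, List.foldl_map]; rfl

-- A's clamped-gap penalty over a slot list
def pvPenalty : List Int → Int
  | a :: b :: t => max (b - a - 1) 0 + pvPenalty (b :: t)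
  | _ => 0

theorem pvLoop_inv (slots : List Int) (w p : Int) :
    ((slots.foldl pvStepS (w, some p)).1) = w + slots.length - pvPenalty (p :: slots) := by
  induction slots generalizing w p with
  | nil => simp [pvPenalty]
  | cons s t ih =>
    simp only [List.foldl_cons, pvStepS, pvPenalty, List.length_cons]
    rw [ih]
    simp only [max_def]
    generalize pvPenalty (s :: t) = q
    split_ifs <;> push_cast <;> linarith

theorem pvRunsAux_head (t : List Int) : ∀ f l, ∃ l' rs, pvRunsAux f l t = (f, l') :: rs := by
  induction t with
  | nil => intro f l; exact ⟨l, [], rfl⟩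
  | cons x t ih =>
    intro f l
    by_cases h : x - l ≤ 1
    · obtain ⟨l', rs, hrs⟩ := ih f x
      exact ⟨l', rs, by simp [pvRunsAux, h, hrs]⟩
    · exact ⟨l, pvRunsAux x x t, by simp [pvRunsAux, h]⟩

theorem pvPenalty_eq_penAux (t : List Int) : ∀ f l, pvPenalty (l :: t) = pvPen (pvRunsAux f l t) := by
  induction t with
  | nil => intro f l; simp [pvPenalty, pvRunsAux, pvPen]
  | cons x t ih =>
    intro f l
    by_cases h : x - l ≤ 1
    · have hmax : max (x - l - 1) 0 = 0 := by omega
      rw [pvPenalty, hmax, zero_add, ih f x, pvRunsAux, if_pos h]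
    · have hmax : max (x - l - 1) 0 = x - l - 1 := by omega
      obtain ⟨l', rs, hrs⟩ := pvRunsAux_head t x x
      rw [pvPenalty, hmax, ih x x, pvRunsAux, if_neg h, hrs, pvPen]

theorem pvPenalty_eq_pen (t : List Int) (s : Int) : pvPenalty (s :: t) = pvPen (pvRuns (s :: t)) := by
  rw [pvRuns]; exact pvPenalty_eq_penAux t s s

-- ===== VERDICT (by name: the statement is the Claim_ definition above) =====
theorem chain_weight_py_spec : Claim_equal_chain_weight_py := by
  intro blocks _
  unfold Spec_chain_weight_py chain_weight_py chain_weight_py_alt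
  rw [pvFoldA_eq_foldS]
  cases h : pvSlots blocks with
  | nil =>
    have hb : blocks = [] := by
      cases blocks with
      | nil => rfl
      | cons b bs => simp [pvSlots] at h
    subst hb
    simp [pvRuns, pvPen]
  | cons s t =>
    have hlen : (blocks.length : Int) = t.length + 1 := by
      have := congrArg List.length h
      simp [pvSlots] at this
      omega
    simp only [List.foldl_cons]
    have hstep : pvStepS (0, none) s = (1, some s) := rfl
    rw [hstep, pvLoop_inv, ← pvPenalty_eq_pen, hlen]
    generalize pvPenalty (s :: t) = q
    have he : (1 : Int) + t.length - q = t.length + 1 - q := by ring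
    rw [he]
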